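-- pv_equiv track=rewrite | github.com/KunalKalawant/VitalitasAi | disease_prediction_project/logic.py | get_related_symptoms
-- ===== SOURCE A (Python) =====
-- symptom_clusters = {
--     1: ["fever", "cough", "fatigue"],
--     2: ["nausea", "vomiting", "diarrhea"],
-- }
--
-- def get_related_symptoms(current_symptoms):
--     related = []
--     current_clusters = set()
--     for symptom in current_symptoms:
--         for cluster_id, symptoms in symptom_clusters.items():
--             if symptom in symptoms:
--                 current_clusters.add(cluster_id)
--     for cluster_id in current_clusters:
--         for symptom in symptom_clusters[cluster_id]:
--             if symptom not in current_symptoms: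
--                 related.append(symptom)
--     return related[:10]
-- ===== SOURCE B (Python) =====
-- symptom_clusters = {
--     1: ["fever", "cough", "fatigue"],
--     2: ["nausea", "vomiting", "diarrhea"],
-- }
--
-- def get_related_symptoms(current_symptoms):
--     related = []
--     for cluster_id, symptoms in symptom_clusters.items():
--         if any(s in current_symptoms for s in symptoms):
--             related.extend(s for s in symptoms if s not in current_symptoms)
--     return related[:10]
-- ===== Notes on version B (the rewrite author's own statement) =====
-- stated objective: simpler
-- what changed: Removes the intermediate current_clusters set and the per-symptom scan that builds it: B makes one pass over symptom_clusters, testing each cluster for activity with any() (which short-circuits) and extending the result directly.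
import Mathlib
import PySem

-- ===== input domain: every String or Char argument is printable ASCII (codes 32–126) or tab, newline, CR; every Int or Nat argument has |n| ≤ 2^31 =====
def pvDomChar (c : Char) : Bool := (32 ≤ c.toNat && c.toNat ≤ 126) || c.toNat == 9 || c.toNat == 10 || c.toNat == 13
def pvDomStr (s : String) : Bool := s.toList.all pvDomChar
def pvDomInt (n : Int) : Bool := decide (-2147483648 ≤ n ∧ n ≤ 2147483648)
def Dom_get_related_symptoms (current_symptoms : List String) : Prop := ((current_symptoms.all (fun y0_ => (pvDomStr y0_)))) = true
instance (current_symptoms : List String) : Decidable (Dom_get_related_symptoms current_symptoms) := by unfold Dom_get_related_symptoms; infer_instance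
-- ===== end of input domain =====

-- B removes the intermediate current_clusters set: one pass over symptom_clusters,
-- a cluster is active iff any of its symptoms is present; objective: simpler.

-- ===== PORT A =====
-- the module constant symptom_clusters, as an association list in insertion order
def symptomClusters : List (Int × List String) :=
  [(1, ["fever", "cough", "fatigue"]), (2, ["nausea", "vomiting", "diarrhea"])]

-- A's port. The Python 'for cluster_id in current_clusters' iterates a CPython set of
-- the small ints 1 and 2, whose hash-table iteration order is ascending value order
-- (hash(i) = i, no collision); PySem.Set does not model iteration order, so that loop
-- is ported as iterating the set's elements in ascending order — exact here.
def get_related_symptoms (current_symptoms : List String) : List String :=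
  let current_clusters : PySem.Set Int :=
    current_symptoms.foldl (fun acc symptom =>
      symptomClusters.foldl (fun acc2 p =>
        if p.2.contains symptom then PySem.Set.add acc2 p.1 else acc2) acc)
      PySem.Set.empty
  let related :=
    (PySem.List.sorted current_clusters (fun x => x) false).foldl (fun r cluster_id =>
      ((PySem.Dict.ofList symptomClusters).getD cluster_id []).foldl (fun r2 symptom =>
        if ¬ (current_symptoms.contains symptom) then r2 ++ [symptom] else r2) r) []
  PySem.List.slice related none (some 10) -- related[:10]

-- ===== PORT B =====
def get_related_symptoms_alt (current_symptoms : List String) : List String :=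
  let related :=
    symptomClusters.foldl (fun r p =>
      if p.2.any (fun s => current_symptoms.contains s) then
        r ++ p.2.filter (fun s => ¬ (current_symptoms.contains s))
      else r) []
  PySem.List.slice related none (some 10)

-- ===== PRECONDITION & SPEC =====
def Spec_get_related_symptoms (current_symptoms : List String) (out : List String) : Prop := out = get_related_symptoms_alt current_symptoms
instance (current_symptoms : List String) (out : List String) : Decidable (Spec_get_related_symptoms current_symptoms out) := by unfold Spec_get_related_symptoms; infer_instance

-- ===== CLAIM (what is proved, stated in full; the proofs are below) =====
def Claim_equal_get_related_symptoms : Prop := ∀ (current_symptoms : List String), Dom_get_related_symptoms current_symptoms → Spec_get_related_symptoms current_symptoms (get_related_symptoms current_symptoms)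

-- ===== LEMMAS AND PROOFS =====

-- membership in the set built by A's first loop: cluster i got added iff some current
-- symptom lies in cluster i
theorem mem_buildSet (cs : List String) (acc : PySem.Set Int) (i : Int) :
    (i ∈ cs.foldl (fun acc symptom =>
        symptomClusters.foldl (fun acc2 p =>
          if p.2.contains symptom then PySem.Set.add acc2 p.1 else acc2) acc) acc) ↔
      (i ∈ acc ∨ ∃ s ∈ cs, ∃ c ∈ symptomClusters, s ∈ c.2 ∧ i = c.1) := by
  induction cs generalizing acc with
  | nil => simp
  | cons h t ih =>
    rw [List.foldl_cons, ih]
    have hstep : ∀ j : Int, (j ∈ symptomClusters.foldl (fun acc2 p =>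
        if p.2.contains h then PySem.Set.add acc2 p.1 else acc2) acc) ↔
        (j ∈ acc ∨ ∃ c ∈ symptomClusters, h ∈ c.2 ∧ j = c.1) := by
      intro j
      simp only [symptomClusters, List.foldl]
      split_ifs with hA hB hB <;> simp_all [PySem.Set.mem_add] <;> tauto
    rw [hstep]
    simp only [List.mem_cons]
    constructor
    · rintro ((h1 | h1) | ⟨s, hs, hc⟩)
      · exact .inl h1
      · exact .inr ⟨h, .inl rfl, h1⟩
      · exact .inr ⟨s, .inr hs, hc⟩
    · rintro (h1 | ⟨s, (rfl | hs), hc⟩)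
      · exact .inl (.inl h1)
      · exact .inl (.inr hc)
      · exact .inr ⟨s, hs, hc⟩

theorem nodup_buildSet (cs : List String) (acc : PySem.Set Int) (h : acc.Nodup) :
    (cs.foldl (fun acc symptom =>
        symptomClusters.foldl (fun acc2 p =>
          if p.2.contains symptom then PySem.Set.add acc2 p.1 else acc2) acc) acc).Nodup := by
  induction cs generalizing acc with
  | nil => exact h
  | cons x t ih =>
    apply ih
    simp only [symptomClusters, List.foldl]
    split_ifs <;> repeat' apply PySem.Set.nodup_add
    all_goals assumption

-- ===== VERDICT (by name: the statement is the Claim_ definition above) =====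
set_option maxHeartbeats 1000000 in
theorem get_related_symptoms_spec : Claim_equal_get_related_symptoms := by
  intro cs _
  unfold Spec_get_related_symptoms get_related_symptoms get_related_symptoms_alt
  simp only []
  set b1 : Prop := ("fever" ∈ cs ∨ "cough" ∈ cs ∨ "fatigue" ∈ cs) with hb1
  set b2 : Prop := ("nausea" ∈ cs ∨ "vomiting" ∈ cs ∨ "diarrhea" ∈ cs) with hb2
  have hmem : ∀ i, (i ∈ cs.foldl (fun acc symptom =>
        symptomClusters.foldl (fun acc2 p =>
          if p.2.contains symptom then PySem.Set.add acc2 p.1 else acc2) acc)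
        PySem.Set.empty) ↔ ((i = 1 ∧ b1) ∨ (i = 2 ∧ b2)) := by
    intro i
    rw [mem_buildSet]
    simp only [PySem.Set.empty, List.not_mem_nil, false_or, symptomClusters, hb1, hb2]
    constructor
    · rintro ⟨s, hs, c, hc, hsc, rfl⟩
      simp only [List.mem_cons, List.not_mem_nil, or_false] at hc
      rcases hc with rfl | rfl <;>
        simp only [List.mem_cons, List.not_mem_nil, or_false] at hsc
      · exact .inl ⟨rfl, by rcases hsc with rfl | rfl | rfl <;> tauto⟩
      · exact .inr ⟨rfl, by rcases hsc with rfl | rfl | rfl <;> tauto⟩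
    · rintro (⟨rfl, hs⟩ | ⟨rfl, hs⟩) <;>
      · rcases hs with hs | hs | hs <;>
        exact ⟨_, hs, by simp⟩
  have hnd := nodup_buildSet cs PySem.Set.empty (by simp [PySem.Set.empty])
  have hsorted : PySem.List.sorted (cs.foldl (fun acc symptom =>
        symptomClusters.foldl (fun acc2 p =>
          if p.2.contains symptom then PySem.Set.add acc2 p.1 else acc2) acc)
        PySem.Set.empty) (fun x => x) false =
      (if b1 then [(1 : Int)] else []) ++ (if b2 then [(2 : Int)] else []) := by
    apply PySem.List.sorted_eq_of_perm_of_pairwise_lt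
    · rw [List.perm_ext_iff_of_nodup]
      · intro a
        rw [hmem a]
        by_cases h1 : b1 <;> by_cases h2 : b2 <;> simp [h1, h2]
      · by_cases h1 : b1 <;> by_cases h2 : b2 <;> simp [h1, h2]
      · exact hnd
    · by_cases h1 : b1 <;> by_cases h2 : b2 <;> simp [h1, h2]
  rw [hsorted]
  have hd1 : (PySem.Dict.ofList [((1 : Int), ["fever", "cough", "fatigue"]),
      ((2 : Int), ["nausea", "vomiting", "diarrhea"])]).getD 1 [] = ["fever", "cough", "fatigue"] := by decide
  have hd2 : (PySem.Dict.ofList [((1 : Int), ["fever", "cough", "fatigue"]),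
      ((2 : Int), ["nausea", "vomiting", "diarrhea"])]).getD 2 [] = ["nausea", "vomiting", "diarrhea"] := by decide
  by_cases h1 : b1 <;> by_cases h2 : b2 <;>
    simp [h1, h2, symptomClusters, hd1, hd2, List.foldl, List.filter] <;>
    split_ifs <;> simp_all
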